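-- pv_equiv track=rewrite | github.com/mudx/pruebas | pares.py | pairs_generator
-- ===== SOURCE A (Python) =====
-- def pairs_generator(n):
--     pairs = []
--     counter = 0
--     number = 0
--
--     while counter < n:
--         if number % 2 == 0:
--             pairs.append(number)
--             counter += 1
--         number += 1
--     return pairs
-- ===== SOURCE B (Python) =====
-- def pairs_generator(n):
--     return [2 * i for i in range(n)]
-- ===== Notes on version B (the rewrite author's own statement) =====
-- stated objective: faster
-- what changed: Replaces the scan over all integers with a parity test and a separate counter by computing each element directly as twice its index over range(n).
import Mathlib
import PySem

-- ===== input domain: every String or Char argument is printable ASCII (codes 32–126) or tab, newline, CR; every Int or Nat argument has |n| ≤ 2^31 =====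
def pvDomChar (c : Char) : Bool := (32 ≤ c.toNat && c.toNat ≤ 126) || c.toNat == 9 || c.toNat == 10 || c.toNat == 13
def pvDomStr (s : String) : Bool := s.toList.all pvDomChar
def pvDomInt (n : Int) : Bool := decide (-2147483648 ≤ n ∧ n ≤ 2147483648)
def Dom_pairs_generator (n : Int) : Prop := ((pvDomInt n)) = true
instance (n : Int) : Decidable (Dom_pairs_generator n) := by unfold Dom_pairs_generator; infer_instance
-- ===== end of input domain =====

-- B replaces A's scan over all integers (parity test + separate counter) by the closed form 2*i per index; objective: simpler.

-- ===== PORT A =====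
-- literal port of A's while loop: state (counter, number, pairs)
def pairs_generator_loop (n counter number : Int) (pairs : List Int) : List Int :=
  if counter < n then
    if number % 2 == 0 then
      pairs_generator_loop n (counter + 1) (number + 1) (pairs ++ [number])
    else
      pairs_generator_loop n counter (number + 1) pairs
  else pairs
termination_by (2 * (n - counter)).toNat + (if number % 2 == 0 then 0 else 1)
decreasing_by
  · simp only [beq_iff_eq] at *
    have h1 : (number + 1) % 2 ≠ 0 := by omega
    simp [h1]; omega
  · simp only [beq_iff_eq] at *
    have h1 : (number + 1) % 2 = 0 := by omega
    simp [h1]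
    have h2 : ¬ (2 : Int) ∣ number := by omega
    simp [h2]

def pairs_generator (n : Int) : List Int := pairs_generator_loop n 0 0 []

-- ===== PORT B =====
def pairs_generator_alt (n : Int) : List Int :=
  (List.range n.toNat).map (fun i : ℕ => 2 * (i : Int))

-- ===== PRECONDITION & SPEC =====
def Spec_pairs_generator (n : Int) (out : List Int) : Prop := out = pairs_generator_alt n
instance (n : Int) (out : List Int) : Decidable (Spec_pairs_generator n out) := by unfold Spec_pairs_generator; infer_instance

-- ===== CLAIM (what is proved, stated in full; the proofs are below) =====
def Claim_equal_pairs_generator : Prop := ∀ (n : Int), Dom_pairs_generator n → Spec_pairs_generator n (pairs_generator n)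

-- ===== LEMMAS AND PROOFS =====

-- the odd intermediate state immediately steps to the next even state
theorem pairs_generator_loop_odd (n c : Int) (p : List Int) :
    pairs_generator_loop n c (2 * c - 1) p = pairs_generator_loop n c (2 * c) p := by
  rw [pairs_generator_loop]
  split
  · have h : ((2 * c - 1) % 2 == 0) = false := by
      simp [Int.sub_emod, Int.mul_emod_right]
    rw [h]
    simp only [Bool.false_eq_true, if_false]
    congr 1
    omega
  · rw [pairs_generator_loop]
    simp [*]

-- loop invariant: from state (c, 2*c, p) the loop appends the remaining evens
theorem pairs_generator_loop_inv (m : ℕ) : ∀ (n c : Int) (p : List Int),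
    (n - c).toNat = m →
    pairs_generator_loop n c (2 * c) p
      = p ++ (List.range m).map (fun i : ℕ => 2 * (c + (i : Int))) := by
  induction m with
  | zero =>
    intro n c p h
    rw [pairs_generator_loop]
    have : ¬ c < n := by omega
    simp [this]
  | succ k ih =>
    intro n c p h
    rw [pairs_generator_loop]
    have hc : c < n := by omega
    have he : ((2 * c) % 2 == 0) = true := by simp [Int.mul_emod_right]
    simp only [hc, if_true, he, if_true]
    have : 2 * c + 1 = 2 * (c + 1) - 1 := by ring
    rw [this, pairs_generator_loop_odd, ih n (c + 1) _ (by omega)]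
    have hr : (List.range (k + 1)).map (fun i : ℕ => 2 * (c + (i : Int)))
        = (2 * c) :: (List.range k).map (fun i : ℕ => 2 * (c + 1 + (i : Int))) := by
      rw [List.range_succ_eq_map, List.map_cons, List.map_map]
      simp only [Nat.cast_zero, add_zero]
      congr 1
      apply List.map_congr_left
      intro i _
      simp [Function.comp]
      ring
    rw [hr]
    simp

-- ===== VERDICT (by name: the statement is the Claim_ definition above) =====
theorem pairs_generator_spec : Claim_equal_pairs_generator := by
  intro n _
  unfold Spec_pairs_generator pairs_generator pairs_generator_alt
  have h := pairs_generator_loop_inv (n - 0).toNat n 0 [] rfl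
  simp only [mul_zero] at h
  rw [h]
  simp
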